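-- pv_equiv track=rewrite | github.com/jacobvsdanniel/pubmedkb_web | kb_utils.py | intersection_of_key_to_set
-- ===== SOURCE A (Python) =====
-- def intersection_of_key_to_set(dict_list):
--     if len(dict_list) <= 1:
--         return dict_list[0]
--
--     dict_list = sorted(dict_list, key=lambda d: len(d))
--     smallest_dict, other_dict_list = dict_list[0], dict_list[1:]
--     del dict_list
--
--     key_to_value_set = {}
--     for key, value_set in smallest_dict.items():
--         if any(
--             key not in other_dict
--             for other_dict in other_dict_list
--         ):
--             continue
--
--         value_set = set(
--             value
--             for value in value_set
--             if all(
--                 value in other_dict[key]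
--                 for other_dict in other_dict_list
--             )
--         )
--
--         if value_set:
--             key_to_value_set[key] = value_set
--
--     return key_to_value_set
-- ===== SOURCE B (Python) =====
-- def intersection_of_key_to_set(dict_list):
--     if len(dict_list) <= 1:
--         return dict_list[0]
--
--     smallest = min(dict_list, key=len)
--     result = {}
--     for key, vals in smallest.items():
--         common = set(vals)
--         for d in dict_list:
--             if key not in d:
--                 common = set()
--                 break
--             common &= d[key]
--         if common:
--             result[key] = common
--     return result
-- ===== Notes on version B (the rewrite author's own statement) =====
-- stated objective: simpler
-- what changed: Replaces A's full stable sort of the dict list plus two separate generator passes (an any-membership scan, then an all-membership filter) by min(key=len) to pick the smallest dict and, per key, one fused loop over all dicts that intersects a running set with an early break on a missing key. (Pre_ excludes only the empty list, where A raises IndexError, and Lean-side association lists with a duplicated key inside one dict, which no Python dict input can produce.)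
import Mathlib
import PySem

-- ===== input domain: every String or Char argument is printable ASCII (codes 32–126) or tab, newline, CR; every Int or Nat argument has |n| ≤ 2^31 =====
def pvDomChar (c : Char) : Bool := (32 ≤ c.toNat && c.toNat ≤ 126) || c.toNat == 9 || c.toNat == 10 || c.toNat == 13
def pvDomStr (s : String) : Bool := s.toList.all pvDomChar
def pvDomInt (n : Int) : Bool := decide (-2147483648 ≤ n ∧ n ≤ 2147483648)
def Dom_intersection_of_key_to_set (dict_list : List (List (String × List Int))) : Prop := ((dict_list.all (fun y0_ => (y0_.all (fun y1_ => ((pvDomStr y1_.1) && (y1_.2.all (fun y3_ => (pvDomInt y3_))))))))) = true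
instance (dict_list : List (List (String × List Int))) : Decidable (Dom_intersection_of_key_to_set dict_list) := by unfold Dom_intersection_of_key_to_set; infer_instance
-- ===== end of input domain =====

-- B drops A's full stable sort and its two separate generator scans: it picks the smallest
-- dict with min(key=len) and, per key, runs ONE fused loop over all dicts that intersects a
-- running set and breaks early at a missing key; objective: simpler (return value equivalence).

-- ===== PORT A =====
def intersection_of_key_to_set (dict_list : List (List (String × List Int))) : List (String × List Int) :=
  if dict_list.length ≤ 1 then
    (PySem.List.pyGet? dict_list 0).getD []
  else
    let sortedL := PySem.List.sorted dict_list (fun d => d.length)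
    let smallest := (PySem.List.pyGet? sortedL 0).getD []
    let others := PySem.List.slice sortedL (some 1) none
    (smallest.foldl (fun acc kv =>
        if others.any (fun od => !((PySem.Dict.mk od).contains kv.1)) then acc
        else
          let vset : PySem.Set Int := PySem.Set.ofList (kv.2.filter (fun v =>
            others.all (fun od => PySem.Set.contains ((PySem.Dict.mk od).getD kv.1 []) v)))
          if vset.isEmpty then acc
          else PySem.Dict.insert acc kv.1 vset)
      PySem.Dict.empty).items

-- ===== PORT B =====
-- inner 'for d in dict_list: … break' loop of Source B ('common &= d[key]', break on missing key)
def pvInterLoop (key : String) (ds : List (List (String × List Int))) (common : PySem.Set Int) : PySem.Set Int :=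
  match ds with
  | [] => common
  | d :: rest =>
    match (PySem.Dict.mk d).get? key with
    | none => PySem.Set.empty
    | some s => pvInterLoop key rest (PySem.Set.inter common s)

def intersection_of_key_to_set_alt (dict_list : List (List (String × List Int))) : List (String × List Int) :=
  if dict_list.length ≤ 1 then
    (PySem.List.pyGet? dict_list 0).getD []
  else
    let smallest := (PySem.List.min? dict_list (fun d => d.length)).getD []
    (smallest.foldl (fun acc kv =>
        let common := pvInterLoop kv.1 dict_list (PySem.Set.ofList kv.2)
        if common.isEmpty then acc
        else PySem.Dict.insert acc kv.1 common)
      PySem.Dict.empty).items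

-- ===== PRECONDITION & SPEC =====
-- Pre_ excludes the empty list, on which A raises IndexError, and association lists carrying a
-- duplicated key inside one dict, which do not represent any Python dict input.
def Pre_intersection_of_key_to_set (dict_list : List (List (String × List Int))) : Prop :=
  dict_list ≠ [] ∧ ∀ d ∈ dict_list, (d.map Prod.fst).Nodup
instance (dict_list : List (List (String × List Int))) : Decidable (Pre_intersection_of_key_to_set dict_list) := by unfold Pre_intersection_of_key_to_set; infer_instance
def pvWitness_intersection_of_key_to_set : (List (List (String × List Int))) :=
  [[("a", [1, 2])], [("a", [2, 3]), ("b", [4])]]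

def Spec_intersection_of_key_to_set (dict_list : List (List (String × List Int))) (out : List (String × List Int)) : Prop := out = intersection_of_key_to_set_alt dict_list
instance (dict_list : List (List (String × List Int))) (out : List (String × List Int)) : Decidable (Spec_intersection_of_key_to_set dict_list out) := by unfold Spec_intersection_of_key_to_set; infer_instance

-- ===== CLAIM (what is proved, stated in full; the proofs are below) =====
def Claim_equal_intersection_of_key_to_set : Prop := ∀ (dict_list : List (List (String × List Int))), Dom_intersection_of_key_to_set dict_list → Pre_intersection_of_key_to_set dict_list → Spec_intersection_of_key_to_set dict_list (intersection_of_key_to_set dict_list)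

-- ===== LEMMAS AND PROOFS =====

-- head of insertBy: the inserted element lands in front iff 'before x (head)'
theorem pv_head_insertBy {α : Type} (before : α → α → Bool) (x : α) (ys : List α) :
    (PySem.List.insertBy before x ys).head? =
      some (match ys with | [] => x | y :: _ => if before x y then x else y) := by
  cases ys with
  | nil => simp [PySem.List.insertBy]
  | cons y t => simp only [PySem.List.insertBy]; split <;> simp

-- head of the insertion-sort fold is the running first-minimum fold
theorem pv_head_foldl_insertBy {α : Type} (before : α → α → Bool) (xs : List α) (acc : List α) :
    (xs.foldl (fun a x => PySem.List.insertBy before x a) acc).head? =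
      xs.foldl (fun m? x =>
        match m? with
        | none => some x
        | some m => if before x m then some x else some m) acc.head? := by
  induction xs generalizing acc with
  | nil => rfl
  | cons x t ih =>
    simp only [List.foldl_cons]
    rw [ih]
    congr 1
    rw [pv_head_insertBy]
    cases acc with
    | nil => rfl
    | cons a l => by_cases h : before x a = true <;> simp [h]

-- head of Python's stable sort = Python's min (first extremal element)
theorem pv_sorted_head_eq_min? {α κ : Type} [LT κ] [DecidableLT κ] (xs : List α) (key : α → κ) :
    (PySem.List.sorted xs key).head? = PySem.List.min? xs key := by
  rw [PySem.List.sorted_eq_foldl_insertBy, pv_head_foldl_insertBy]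
  unfold PySem.List.min?
  apply PySem.List.foldl_congr_mem
  intro acc x _
  cases acc <;> simp

-- first-match lookup in an assoc list with pairwise-distinct keys finds the listed pair
theorem pv_get?_mk_of_nodup (d : List (String × List Int)) (k : String) (vs : List Int)
    (hnd : (d.map Prod.fst).Nodup) (hmem : (k, vs) ∈ d) :
    (PySem.Dict.mk d).get? k = some vs := by
  induction d with
  | nil => cases hmem
  | cons p rest ih =>
    rw [show (p : String × List Int) = (p.1, p.2) from rfl, PySem.Dict.get?_mk_cons]
    rcases List.mem_cons.mp hmem with h | h
    · cases h; simp
    · have hk : k ∈ rest.map Prod.fst := List.mem_map.mpr ⟨(k, vs), h, rfl⟩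
      have hne : p.1 ≠ k := by
        intro he; exact (List.nodup_cons.mp (by simpa using hnd)).1 (he ▸ hk)
      simp only [beq_iff_eq, if_neg hne]
      exact ih (List.nodup_cons.mp (by simpa using hnd)).2 h

-- Dict.contains tells whether get? succeeds
theorem pv_contains_eq_isSome (l : List (String × List Int)) (k : String) :
    (PySem.Dict.mk l).contains k = ((PySem.Dict.mk l).get? k).isSome := by
  induction l with
  | nil => rfl
  | cons p rest ih =>
    rw [show (p : String × List Int) = (p.1, p.2) from rfl, PySem.Dict.get?_mk_cons]
    simp only [PySem.Dict.contains] at ih ⊢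
    by_cases h : (p.1 == k) = true <;> simp [h, ih]

-- the fused intersect-with-break loop, characterised
theorem pv_interLoop_eq (k : String) (ds : List (List (String × List Int))) (s : PySem.Set Int) :
    pvInterLoop k ds s =
      if ds.all (fun d => (PySem.Dict.mk d).contains k) then
        s.filter (fun v => ds.all (fun d => PySem.Set.contains ((PySem.Dict.mk d).getD k []) v))
      else [] := by
  induction ds generalizing s with
  | nil => simp [pvInterLoop]
  | cons d rest ih =>
    rcases hg : (PySem.Dict.mk d).get? k with _ | sd
    · have hcf : (PySem.Dict.mk d).contains k = false := by
        rw [pv_contains_eq_isSome, hg]; rfl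
      rw [show pvInterLoop k (d :: rest) s = PySem.Set.empty by simp [pvInterLoop, hg],
        show ((d :: rest).all fun d' => (PySem.Dict.mk d').contains k) = false by
          rw [List.all_cons, hcf, Bool.false_and]]
      rfl
    · have hc : (PySem.Dict.mk d).contains k = true := by
        rw [pv_contains_eq_isSome, hg]; rfl
      have hgd : (PySem.Dict.mk d).getD k [] = sd := by simp [PySem.Dict.getD, hg]
      rw [show pvInterLoop k (d :: rest) s = pvInterLoop k rest (PySem.Set.inter s sd) by
        simp [pvInterLoop, hg]]
      rw [ih]
      by_cases hall : rest.all (fun d => (PySem.Dict.mk d).contains k) = true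
      · simp only [List.all_cons, hc, hall, Bool.true_and, if_pos, hgd]
        rw [show PySem.Set.inter s sd = s.filter (fun x => PySem.Set.contains sd x) from rfl,
          List.filter_filter]
        apply List.filter_congr
        intro v _
        simp [Bool.and_comm]
      · rw [List.all_cons, hc, Bool.true_and, eq_false_of_ne_true hall]
        rfl

-- set(filter) = filter(set): first-occurrence dedup commutes with filtering
theorem pv_ofList_filter (p : Int → Bool) (xs : List Int) :
    PySem.Set.ofList (xs.filter p) = (PySem.Set.ofList xs).filter p := by
  suffices h : ∀ (xs : List Int) (acc : PySem.Set Int),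
      (xs.filter p).foldl PySem.Set.add (acc.filter p) = (xs.foldl PySem.Set.add acc).filter p by
    simpa using h xs []
  intro xs
  induction xs with
  | nil => intro acc; rfl
  | cons x t ih =>
    intro acc
    by_cases hp : p x = true
    · simp only [List.filter_cons, hp, if_pos, List.foldl_cons]
      have hcont : (acc.filter p).contains x = acc.contains x := by
        simp [hp]
      rw [show PySem.Set.add (acc.filter p) x =
            if (acc.filter p).contains x then acc.filter p else acc.filter p ++ [x] from rfl,
          show PySem.Set.add acc x = if acc.contains x then acc else acc ++ [x] from rfl,
          hcont]
      by_cases hac : acc.contains x = true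
      · simp only [hac, if_pos]; exact ih acc
      · simp only [hac, Bool.false_eq_true, if_false]
        have : (acc ++ [x]).filter p = acc.filter p ++ [x] := by
          simp [List.filter_append, hp]
        rw [← this]; exact ih (acc ++ [x])
    · simp only [List.filter_cons, hp, List.foldl_cons]
      rw [show PySem.Set.add acc x = if acc.contains x then acc else acc ++ [x] from rfl]
      by_cases hac : acc.contains x = true
      · simp only [hac, if_pos]; exact ih acc
      · simp only [hac, Bool.false_eq_true, if_false]
        have : (acc ++ [x]).filter p = acc.filter p := by
          simp [List.filter_append, hp]
        rw [← this]; exact ih (acc ++ [x])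

-- ===== VERDICT (by name: the statement is the Claim_ definition above) =====
theorem intersection_of_key_to_set_spec : Claim_equal_intersection_of_key_to_set := by
  intro dl _ hpre
  obtain ⟨hne, hnodup⟩ := hpre
  unfold Spec_intersection_of_key_to_set intersection_of_key_to_set intersection_of_key_to_set_alt
  by_cases hlen : dl.length ≤ 1
  · simp [hlen]
  · simp only [if_neg hlen]
    rcases hs : PySem.List.sorted dl (fun d => d.length) with _ | ⟨m, t⟩
    · exact absurd ((PySem.List.sorted_eq_nil_iff dl _ false).mp hs) hne
    · have hmin : PySem.List.min? dl (fun d => d.length) = some m := by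
        rw [← pv_sorted_head_eq_min?, hs]; rfl
      have hperm : (m :: t).Perm dl := hs ▸ PySem.List.sorted_perm dl _ false
      have hmmem : m ∈ dl := hperm.subset (List.mem_cons_self)
      have hget0 : PySem.List.pyGet? (m :: t) 0 = some m := by
        simp [PySem.List.pyGet?, PySem.List.pyIdx?]
      have hslice : PySem.List.slice (m :: t) (some 1) none = t := by
        rw [PySem.List.slice_from _ (by norm_num)]; rfl
      rw [hget0, hslice, hmin]
      simp only [Option.getD_some]
      congr 1
      apply PySem.List.foldl_congr_mem
      intro acc kv hkv
      obtain ⟨k, vs⟩ := kv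
      have hndm : (m.map Prod.fst).Nodup := hnodup m hmmem
      have hgk : (PySem.Dict.mk m).get? k = some vs := pv_get?_mk_of_nodup m k vs hndm hkv
      have hck : (PySem.Dict.mk m).contains k = true := by
        rw [pv_contains_eq_isSome, hgk]; rfl
      have halleq : ∀ (Q : List (String × List Int) → Bool), dl.all Q = (m :: t).all Q := by
        intro Q
        rcases h : (m :: t).all Q with _ | _
        · rcases h' : dl.all Q with _ | _
          · rfl
          · exfalso
            rw [List.all_eq_true] at h'
            rw [Bool.eq_false_iff, Ne, List.all_eq_true] at h
            exact h (fun x hx => h' x (hperm.subset hx))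
        · rw [List.all_eq_true] at h
          exact List.all_eq_true.mpr (fun x hx => h x (hperm.mem_iff.mpr hx))
      simp only
      rw [pv_interLoop_eq]
      simp only [halleq]
      rw [List.all_cons, hck, Bool.true_and]
      by_cases hP : (t.all fun d => (PySem.Dict.mk d).contains k) = true
      · have hany : (t.any fun od => !(PySem.Dict.mk od).contains k) = false := by
          rw [← List.not_all_eq_any_not, hP]; rfl
        rw [hP, hany]
        have hgd : (PySem.Dict.mk m).getD k [] = vs := by simp [PySem.Dict.getD, hgk]
        have hfeq : (List.filter (fun v => (m :: t).all fun d =>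
              PySem.Set.contains ((PySem.Dict.mk d).getD k []) v) (PySem.Set.ofList vs))
            = PySem.Set.ofList (List.filter (fun v => t.all fun od =>
              PySem.Set.contains ((PySem.Dict.mk od).getD k []) v) vs) := by
          rw [pv_ofList_filter]
          apply List.filter_congr
          intro v hv
          have hvvs : v ∈ vs := (PySem.Set.mem_ofList vs v).mp hv
          simp only [List.all_cons, hgd]
          rw [show PySem.Set.contains vs v = true from by
            simp only [PySem.Set.contains]; exact List.contains_iff_mem.mpr hvvs, Bool.true_and]
        rw [hfeq]
        simp
      · have hany : (t.any fun od => !(PySem.Dict.mk od).contains k) = true := by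
          rw [← List.not_all_eq_any_not, eq_false_of_ne_true hP]; rfl
        rw [eq_false_of_ne_true hP, hany]
        simp
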